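-- pv_equiv track=rewrite | github.com/simon-wilmes/rehabiliation-admission-scheduling | test2.py | generate_unique_tuples
-- ===== SOURCE A (Python) =====
-- def generate_unique_tuples(lists):
--     def backtrack(current_tuple, used_elements, depth):
--         # Base case: If the tuple is complete, yield it
--         if depth == len(lists):
--             yield tuple(current_tuple)
--             return
--
--         # Iterate through the current list at 'depth'
--         for num in lists[depth]:
--             if num not in used_elements:  # Check if num causes duplicates
--                 # Include num in the current tuple and mark it as used
--                 current_tuple.append(num)
--                 used_elements.add(num)
--
--                 # Recur to the next depth
--                 yield from backtrack(current_tuple, used_elements, depth + 1)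
--
--                 # Backtrack: remove num and unmark it
--                 current_tuple.pop()
--                 used_elements.remove(num)
--
--     # Start backtracking from depth 0
--     return backtrack([], set(), 0)
-- ===== SOURCE B (Python) =====
-- def generate_unique_tuples(lists):
--     # Generate the full cartesian product with a fold, then keep the
--     # all-distinct tuples; product order (last list fastest) matches A's order.
--     def gen():
--         tuples = [()]
--         for lst in lists:
--             tuples = [t + (x,) for t in tuples for x in lst]
--         for t in tuples:
--             if len(set(t)) == len(t):
--                 yield t
--     return gen()
-- ===== Notes on version B (the rewrite author's own statement) =====
-- stated objective: alternative
-- what changed: Replaces the pruned depth-first backtracking with its mutable running tuple and used-set by a fold that builds the full cartesian product and a final all-distinct (len(set(t)) == len(t)) filter pass.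
import Mathlib
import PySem

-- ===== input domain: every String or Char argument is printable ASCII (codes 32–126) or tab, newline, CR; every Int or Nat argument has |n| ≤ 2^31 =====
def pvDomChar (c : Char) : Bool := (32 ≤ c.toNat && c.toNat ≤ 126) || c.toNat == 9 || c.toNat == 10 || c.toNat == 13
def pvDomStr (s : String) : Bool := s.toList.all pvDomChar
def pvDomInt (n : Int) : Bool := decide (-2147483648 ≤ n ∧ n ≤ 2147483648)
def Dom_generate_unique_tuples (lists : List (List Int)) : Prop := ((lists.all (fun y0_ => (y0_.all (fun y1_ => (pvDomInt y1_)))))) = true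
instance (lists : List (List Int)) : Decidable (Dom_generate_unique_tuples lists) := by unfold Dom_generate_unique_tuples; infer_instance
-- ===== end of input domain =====

-- B replaces A's pruned backtracking (running tuple + used-set) by a fold-built cartesian
-- product followed by an all-distinct filter; objective: alternative (not faster).

-- ===== PORT A =====
-- backtrack(current_tuple, used_elements, depth): the loop over depths becomes structural
-- recursion over the suffix lists.drop depth (depth only ever indexes lists in order).
def pvBacktrack : List Int → PySem.Set Int → List (List Int) → List (List Int)
  | current, _, [] => [current]
  | current, used, l :: rest =>
      l.foldl (fun acc num =>
        if !(PySem.Set.contains used num) then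
          acc ++ pvBacktrack (current ++ [num]) (PySem.Set.add used num) rest
        else acc) []

def generate_unique_tuples (lists : List (List Int)) : List (List Int) :=
  pvBacktrack [] PySem.Set.empty lists

-- ===== PORT B =====
def generate_unique_tuples_alt (lists : List (List Int)) : List (List Int) :=
  -- tuples = [()] ; for lst in lists: tuples = [t + (x,) for t in tuples for x in lst]
  let tuples := lists.foldl (fun ts lst => ts.flatMap (fun t => lst.map (fun x => t ++ [x]))) [[]]
  -- for t in tuples: if len(set(t)) == len(t): yield t
  tuples.foldl (fun out t => if (PySem.Set.ofList t).length == t.length then out ++ [t] else out) []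

-- ===== PRECONDITION & SPEC =====
def Spec_generate_unique_tuples (lists : List (List Int)) (out : List (List Int)) : Prop := out = generate_unique_tuples_alt lists
instance (lists : List (List Int)) (out : List (List Int)) : Decidable (Spec_generate_unique_tuples lists out) := by unfold Spec_generate_unique_tuples; infer_instance

-- ===== CLAIM (what is proved, stated in full; the proofs are below) =====
def Claim_equal_generate_unique_tuples : Prop := ∀ (lists : List (List Int)), Dom_generate_unique_tuples lists → Spec_generate_unique_tuples lists (generate_unique_tuples lists)

-- ===== LEMMAS AND PROOFS =====

-- all tuples picking one element per list, last list varying fastest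
def pvProd : List (List Int) → List (List Int)
  | [] => [[]]
  | l :: rest => l.flatMap (fun x => (pvProd rest).map (fun t => x :: t))

-- "t extends the walk: no duplicate inside t, nothing of t already used"
def pvFresh : PySem.Set Int → List Int → Bool
  | _, [] => true
  | s, x :: t => !(PySem.Set.contains s x) && pvFresh (PySem.Set.add s x) t

lemma pvUpdate_length_le (t : List Int) : ∀ s : PySem.Set Int,
    (PySem.Set.update s t).length ≤ s.length + t.length := by
  induction t with
  | nil => intro s; simp [PySem.Set.update]
  | cons x t ih =>
      intro s
      have h := ih (PySem.Set.add s x)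
      have hx : (PySem.Set.add s x).length ≤ s.length + 1 := by
        simp only [PySem.Set.add]; split <;> simp
      simp only [PySem.Set.update, List.foldl_cons, List.length_cons] at *
      omega

lemma pvFresh_eq (t : List Int) : ∀ s : PySem.Set Int,
    pvFresh s t = ((PySem.Set.update s t).length == s.length + t.length) := by
  induction t with
  | nil => intro s; simp [pvFresh, PySem.Set.update]
  | cons x t ih =>
      intro s
      simp only [pvFresh, ih (PySem.Set.add s x), PySem.Set.update, List.foldl_cons,
        List.length_cons]
      by_cases h : PySem.Set.contains s x
      · have hmem : x ∈ s := by simpa [PySem.Set.contains] using h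
        have hadd : PySem.Set.add s x = s := by simp [PySem.Set.add, hmem]
        have hle := pvUpdate_length_le t s
        simp only [PySem.Set.update] at hle
        rw [hadd]
        simp only [h, Bool.not_true, Bool.false_and]
        symm
        rw [Bool.eq_false_iff]
        intro hc
        simp only [beq_iff_eq] at hc
        omega
      · have hmem : x ∉ s := by simpa [PySem.Set.contains] using h
        have hadd : (PySem.Set.add s x).length = s.length + 1 := by
          simp [PySem.Set.add, hmem]
        simp only [h, Bool.not_false, Bool.true_and, hadd]
        have he : s.length + 1 + t.length = s.length + (t.length + 1) := by omega
        rw [he]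

lemma pvFilter_flatMap_if (l : List Int) (p : Int → Bool) (f : Int → List (List Int)) :
    (l.filter p).flatMap f = l.flatMap (fun x => if p x then f x else []) := by
  induction l with
  | nil => simp
  | cons x l ih => by_cases h : p x <;> simp [h, ih]

lemma pvFoldl_prod (rest : List (List Int)) : ∀ ts : List (List Int),
    rest.foldl (fun ts lst => ts.flatMap (fun t => lst.map (fun x => t ++ [x]))) ts
      = ts.flatMap (fun t => (pvProd rest).map (fun u => t ++ u)) := by
  induction rest with
  | nil => intro ts; simp [pvProd]
  | cons l rest ih =>
      intro ts
      simp only [List.foldl_cons, ih, pvProd, List.flatMap_assoc, List.flatMap_map,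
        List.map_flatMap]
      apply List.flatMap_congr
      intro t _
      apply List.flatMap_congr
      intro x _
      rw [List.map_map]
      apply List.map_congr_left
      intro u _
      simp

lemma pvBacktrack_eq (rest : List (List Int)) : ∀ (current : List Int) (used : PySem.Set Int),
    pvBacktrack current used rest
      = ((pvProd rest).filter (pvFresh used)).map (fun t => current ++ t) := by
  induction rest with
  | nil => intro current used; simp [pvBacktrack, pvProd, pvFresh]
  | cons l rest ih =>
      intro current used
      simp only [pvBacktrack]
      rw [PySem.List.foldl_if_eq_foldl_filter]
      rw [show (fun (acc : List (List Int)) num =>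
            acc ++ pvBacktrack (current ++ [num]) (PySem.Set.add used num) rest)
          = (fun (acc : List (List Int)) num =>
            acc ++ (fun num => pvBacktrack (current ++ [num]) (PySem.Set.add used num) rest) num)
          from rfl]
      rw [PySem.List.foldl_append_eq_flatMap, pvFilter_flatMap_if]
      simp only [List.nil_append, pvProd, List.filter_flatMap, List.filter_map,
        List.map_flatMap]
      apply List.flatMap_congr
      intro x _
      by_cases h : PySem.Set.contains used x
      · have hmem : x ∈ used := by simpa [PySem.Set.contains] using h
        have hc : (pvFresh used ∘ fun t => x :: t) = fun _ => false := by
          funext u; simp [Function.comp, pvFresh, PySem.Set.contains, hmem]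
        simp [hc, hmem]
      · have hmem : x ∉ used := by simpa [PySem.Set.contains] using h
        have hc : (pvFresh used ∘ fun t => x :: t) = pvFresh (PySem.Set.add used x) := by
          funext u; simp [Function.comp, pvFresh, PySem.Set.contains, hmem]
        rw [hc, if_pos (by simpa [PySem.Set.contains] using hmem)]
        rw [ih (current ++ [x]) (PySem.Set.add used x), List.map_map]
        apply List.map_congr_left
        intro u _
        simp [Function.comp]

lemma pvOfList_update (t : List Int) :
    PySem.Set.update PySem.Set.empty t = PySem.Set.ofList t := by
  rw [PySem.Set.ofList_eq_foldl]; rfl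

-- ===== VERDICT (by name: the statement is the Claim_ definition above) =====
theorem generate_unique_tuples_spec : Claim_equal_generate_unique_tuples := by
  intro lists _
  unfold Spec_generate_unique_tuples generate_unique_tuples generate_unique_tuples_alt
  rw [pvBacktrack_eq lists [] PySem.Set.empty, pvFoldl_prod lists [[]]]
  rw [PySem.List.foldl_append_if]
  simp only [List.flatMap_cons, List.flatMap_nil, List.append_nil, List.nil_append,
    List.map_id']
  apply List.filter_congr
  intro t _
  rw [pvFresh_eq t PySem.Set.empty, pvOfList_update]
  simp [PySem.Set.empty]
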